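-- pv_equiv track=rewrite | github.com/LarkLucifer/GhillieSuite-EX | ghilliesuite_ex/arsenal.py | apply_turbo_args
-- ===== SOURCE A (Python) =====
-- def apply_turbo_args(tool_name: str, cmd: list[str], enabled: bool) -> list[str]:
--     """
--     Boost performance flags for VPS/Data Center environments.
--     """
--     if not enabled:
--         return list(cmd)
--
--     # Simple scaling: if turbo is on, we swap the safe defaults for aggressive ones
--     turbo_map = {
--         "httpx":  [("-rl", "15", "150")],
--         "ffuf":   [("-t", "10", "100")],
--         "arjun":  [("-t", "5", "30")],
--         "sqlmap": [("--threads=3", "--threads=10")],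
--         "nuclei": [("-rl", "5", "150"), ("-c", "5", "50")],
--         "naabu":  [("-rate", "250", "1000"), ("-top-ports", "1000", "1000")],
--     }
--
--     if tool_name not in turbo_map:
--         return list(cmd)
--
--     new_cmd = list(cmd)
--     for target_flag, old_val, new_val in [ (x[0], x[1], x[2]) if len(x)==3 else (x[0], None, x[1]) for x in turbo_map[tool_name] ]:
--         for i, tok in enumerate(new_cmd):
--             if old_val: # Pair flag (e.g. -rl 15)
--                 if tok == target_flag and i+1 < len(new_cmd) and new_cmd[i+1] == old_val:
--                     new_cmd[i+1] = new_val
--             else: # Single flag (e.g. --threads=3)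
--                 if tok == target_flag:
--                     new_cmd[i] = new_val
--
--     return new_cmd
-- ===== SOURCE B (Python) =====
-- def apply_turbo_args(tool_name: str, cmd: list[str], enabled: bool) -> list[str]:
--     """
--     Boost performance flags for VPS/Data Center environments.
--     """
--     turbo_map = {
--         "httpx":  [("-rl", "15", "150")],
--         "ffuf":   [("-t", "10", "100")],
--         "arjun":  [("-t", "5", "30")],
--         "sqlmap": [("--threads=3", "--threads=10")],
--         "nuclei": [("-rl", "5", "150"), ("-c", "5", "50")],
--         "naabu":  [("-rate", "250", "1000"), ("-top-ports", "1000", "1000")],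
--     }
--     if not enabled or tool_name not in turbo_map:
--         return list(cmd)
--     singles = {x[0]: x[1] for x in turbo_map[tool_name] if len(x) == 2}
--     pairs = {x[0]: (x[1], x[2]) for x in turbo_map[tool_name] if len(x) == 3}
--     out = []
--     prev = None
--     for tok in cmd:
--         if tok in singles:
--             out.append(singles[tok])
--         elif prev in pairs and tok == pairs[prev][0]:
--             out.append(pairs[prev][1])
--         else:
--             out.append(tok)
--         prev = tok
--     return out
-- ===== Notes on version B (the rewrite author's own statement) =====
-- stated objective: simpler
-- what changed: A applies each turbo rule with its own in-place scan over the (mutated) command list; B builds single-flag and pair-flag lookup dicts once and rewrites the command in one pass, keying pair replacements on the previous original token.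
import Mathlib
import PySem

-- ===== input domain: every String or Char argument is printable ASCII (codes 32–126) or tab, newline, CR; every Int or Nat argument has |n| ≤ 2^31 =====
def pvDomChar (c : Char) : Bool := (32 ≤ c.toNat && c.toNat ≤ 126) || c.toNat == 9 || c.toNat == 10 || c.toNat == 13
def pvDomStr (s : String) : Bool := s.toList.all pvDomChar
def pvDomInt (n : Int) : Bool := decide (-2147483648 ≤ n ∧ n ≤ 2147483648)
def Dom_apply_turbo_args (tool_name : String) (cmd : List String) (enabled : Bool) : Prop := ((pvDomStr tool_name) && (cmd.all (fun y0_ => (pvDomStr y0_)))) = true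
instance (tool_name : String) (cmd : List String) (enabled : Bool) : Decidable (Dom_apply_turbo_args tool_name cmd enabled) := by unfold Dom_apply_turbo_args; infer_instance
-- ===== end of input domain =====

-- B replaces A's sequence of in-place index scans (one pass per replacement rule) by lookup
-- dicts built once and a single pass over cmd tracking the previous token (objective: simpler).

-- ===== PORT A =====
-- Python's mixed-arity tuples (len 2 or 3) are encoded as List String; all indexing below is
-- on literal lists of known length, so getD with default "" is exact.
def pvTurboMapA : PySem.Dict String (List (List String)) := PySem.Dict.ofList
  [("httpx",  [["-rl", "15", "150"]]),
   ("ffuf",   [["-t", "10", "100"]]),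
   ("arjun",  [["-t", "5", "30"]]),
   ("sqlmap", [["--threads=3", "--threads=10"]]),
   ("nuclei", [["-rl", "5", "150"], ["-c", "5", "50"]]),
   ("naabu",  [["-rate", "250", "1000"], ["-top-ports", "1000", "1000"]])]

-- the inner 'for i, tok in enumerate(new_cmd)' loop, mutating the list in place: a fold over the
-- indices carrying the list; all reads (tok, new_cmd[i+1]) are in range, so getD "" is exact.
-- Python's 'if old_val:' truthiness: old_val is None or a non-empty literal, so isSome is exact.
def pvAScan (target_flag : String) (old_val : Option String) (new_val : String)
    (new_cmd : List String) : List String :=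
  (List.range new_cmd.length).foldl (fun acc i =>
    match old_val with
    | some ov =>
        if acc.getD i "" = target_flag ∧ i + 1 < acc.length ∧ acc.getD (i+1) "" = ov then
          acc.set (i+1) new_val
        else acc
    | none =>
        if acc.getD i "" = target_flag then acc.set i new_val else acc) new_cmd

def apply_turbo_args (tool_name : String) (cmd : List String) (enabled : Bool) : List String :=
  if !enabled then cmd
  else
    match pvTurboMapA.get? tool_name with
    | none => cmd
    | some rules =>
        ((rules.map (fun x =>
            if x.length = 3 then (x.getD 0 "", some (x.getD 1 ""), x.getD 2 "")
            else (x.getD 0 "", (none : Option String), x.getD 1 ""))).foldl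
          (fun new_cmd r => pvAScan r.1 r.2.1 r.2.2 new_cmd) cmd)

-- ===== PORT B =====
def pvTurboMapB : PySem.Dict String (List (List String)) := PySem.Dict.ofList
  [("httpx",  [["-rl", "15", "150"]]),
   ("ffuf",   [["-t", "10", "100"]]),
   ("arjun",  [["-t", "5", "30"]]),
   ("sqlmap", [["--threads=3", "--threads=10"]]),
   ("nuclei", [["-rl", "5", "150"], ["-c", "5", "50"]]),
   ("naabu",  [["-rate", "250", "1000"], ["-top-ports", "1000", "1000"]])]

-- one token of B's single pass: singles lookup, else pair lookup keyed by the previous token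
def pvOutTok (singles : PySem.Dict String String) (pairs : PySem.Dict String (String × String))
    (prev : Option String) (tok : String) : String :=
  match singles.get? tok with
  | some nv => nv
  | none =>
      match prev.bind pairs.get? with
      | some pr => if tok = pr.1 then pr.2 else tok
      | none => tok

-- B's 'for tok in cmd' loop with the running prev (appends become cons)
def pvAltLoop (singles : PySem.Dict String String) (pairs : PySem.Dict String (String × String))
    (prev : Option String) : List String → List String
  | [] => []
  | tok :: rest => pvOutTok singles pairs prev tok :: pvAltLoop singles pairs (some tok) rest

def apply_turbo_args_alt (tool_name : String) (cmd : List String) (enabled : Bool) : List String :=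
  if !enabled then cmd
  else
    match pvTurboMapB.get? tool_name with
    | none => cmd
    | some rules =>
        let singles : PySem.Dict String String :=
          (rules.filter (fun x => x.length = 2)).foldl
            (fun d x => d.insert (x.getD 0 "") (x.getD 1 "")) PySem.Dict.empty
        let pairs : PySem.Dict String (String × String) :=
          (rules.filter (fun x => x.length = 3)).foldl
            (fun d x => d.insert (x.getD 0 "") (x.getD 1 "", x.getD 2 "")) PySem.Dict.empty
        pvAltLoop singles pairs none cmd

-- ===== PRECONDITION & SPEC =====
def Spec_apply_turbo_args (tool_name : String) (cmd : List String) (enabled : Bool) (out : List String) : Prop := out = apply_turbo_args_alt tool_name cmd enabled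
instance (tool_name : String) (cmd : List String) (enabled : Bool) (out : List String) : Decidable (Spec_apply_turbo_args tool_name cmd enabled out) := by unfold Spec_apply_turbo_args; infer_instance

-- ===== CLAIM (what is proved, stated in full; the proofs are below) =====
def Claim_equal_apply_turbo_args : Prop := ∀ (tool_name : String) (cmd : List String) (enabled : Bool), Dom_apply_turbo_args tool_name cmd enabled → Spec_apply_turbo_args tool_name cmd enabled (apply_turbo_args tool_name cmd enabled)

-- ===== LEMMAS AND PROOFS =====

theorem pvPairFold_length (f ov nv : String) (l : List Nat) (acc : List String) :
    (l.foldl (fun acc i =>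
      if acc.getD i "" = f ∧ i + 1 < acc.length ∧ acc.getD (i+1) "" = ov then
        acc.set (i+1) nv else acc) acc).length = acc.length := by
  induction l generalizing acc with
  | nil => rfl
  | cons i t ih => rw [List.foldl_cons, ih]; split_ifs <;> simp

-- pointwise value of one pair-rule scan, for any prefix of the index range
theorem pvPairFold_getElem? (f ov nv : String) (hf : f ≠ "") (ho : ov ≠ "")
    (hfo : f ≠ ov) (hfn : f ≠ nv) (xs : List String) (n : Nat) (j : Nat) :
    ((List.range n).foldl (fun acc i =>
      if acc.getD i "" = f ∧ i + 1 < acc.length ∧ acc.getD (i+1) "" = ov then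
        acc.set (i+1) nv else acc) xs)[j]? =
    if 1 ≤ j ∧ j ≤ n ∧ xs[j-1]? = some f ∧ xs[j]? = some ov then some nv else xs[j]? := by
  induction n generalizing j with
  | zero =>
    rw [List.range_zero, List.foldl_nil, if_neg (by rintro ⟨a, b, -, -⟩; omega)]
  | succ n ih =>
    rw [List.range_succ, List.foldl_append, List.foldl_cons, List.foldl_nil]
    set acc : List String := (List.range n).foldl (fun acc i =>
      if acc.getD i "" = f ∧ i + 1 < acc.length ∧ acc.getD (i+1) "" = ov then
        acc.set (i+1) nv else acc) xs with hacc
    have hlen : acc.length = xs.length := pvPairFold_length f ov nv _ xs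
    have hn1 : acc[n+1]? = xs[n+1]? := by rw [ih (n+1)]; simp
    have hn : acc[n]? = if 1 ≤ n ∧ n ≤ n ∧ xs[n-1]? = some f ∧ xs[n]? = some ov
        then some nv else xs[n]? := ih n
    have hgd : ∀ (k : Nat), acc.getD k "" = (acc[k]?).getD "" := fun k =>
      List.getD_eq_getElem?_getD
    by_cases hc : xs[n]? = some f ∧ xs[n+1]? = some ov
    · have hnn : acc[n]? = some f := by
        rw [hn]
        split_ifs with h
        · exfalso
          rw [hc.1] at h
          exact hfo (Option.some_injective _ h.2.2.2)
        · exact hc.1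
      obtain ⟨hlt', -⟩ := List.getElem?_eq_some_iff.mp hc.2
      have c1 : acc.getD n "" = f := by rw [hgd n, hnn]; rfl
      have c2 : n + 1 < acc.length := by omega
      have c3 : acc.getD (n+1) "" = ov := by rw [hgd (n+1), hn1, hc.2]; rfl
      rw [if_pos ⟨c1, c2, c3⟩, List.getElem?_set]
      by_cases hj : n + 1 = j
      · subst hj
        have hr : 1 ≤ n+1 ∧ n+1 ≤ n+1 ∧ xs[n+1-1]? = some f ∧ xs[n+1]? = some ov :=
          ⟨by omega, by omega, by simpa using hc.1, hc.2⟩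
        rw [if_pos rfl, if_pos c2, if_pos hr]
      · rw [if_neg hj, ih j]
        have : (1 ≤ j ∧ j ≤ n ∧ xs[j-1]? = some f ∧ xs[j]? = some ov)
            ↔ (1 ≤ j ∧ j ≤ n + 1 ∧ xs[j-1]? = some f ∧ xs[j]? = some ov) := by
          constructor
          · rintro ⟨a, b, c, d⟩; exact ⟨a, by omega, c, d⟩
          · rintro ⟨a, b, c, d⟩; exact ⟨a, by omega, c, d⟩
        split_ifs with h1 h2 h2
        · rfl
        · exact absurd (this.mp h1) h2
        · exact absurd (this.mpr h2) h1
        · rfl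
    · have hstep : ¬(acc.getD n "" = f ∧ n + 1 < acc.length ∧ acc.getD (n+1) "" = ov) := by
        rintro ⟨h1, h2, h3⟩
        apply hc
        rw [hgd n, hn] at h1
        rw [hgd (n+1), hn1] at h3
        split_ifs at h1 with h
        · simp only [Option.getD_some] at h1
          exact absurd h1.symm hfn
        · refine ⟨?_, ?_⟩
          · cases h4 : xs[n]? with
            | none => rw [h4] at h1; simp only [Option.getD_none] at h1; exact absurd h1.symm hf
            | some v => rw [h4] at h1; simp only [Option.getD_some] at h1; rw [h1]
          · cases h5 : xs[n+1]? with
            | none => rw [h5] at h3; simp only [Option.getD_none] at h3; exact absurd h3.symm ho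
            | some w => rw [h5] at h3; simp only [Option.getD_some] at h3; rw [h3]
      rw [if_neg hstep, ih j]
      by_cases hj : j = n + 1
      · subst hj
        rw [if_neg (fun h => absurd h.2.1 (by omega : ¬ n + 1 ≤ n)),
          if_neg (fun h => hc ⟨by simpa using h.2.2.1, h.2.2.2⟩)]
      · split_ifs with h1 h2 h2
        · rfl
        · exact absurd ⟨h1.1, by omega, h1.2.2.1, h1.2.2.2⟩ h2
        · obtain ⟨a, b, c, d⟩ := h2
          exact absurd ⟨a, by omega, c, d⟩ h1
        · rfl

theorem pvAScan_pair_getElem? (f ov nv : String) (hf : f ≠ "") (ho : ov ≠ "")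
    (hfo : f ≠ ov) (hfn : f ≠ nv) (xs : List String) (j : Nat) :
    (pvAScan f (some ov) nv xs)[j]? =
    if 1 ≤ j ∧ xs[j-1]? = some f ∧ xs[j]? = some ov then some nv else xs[j]? := by
  have he : pvAScan f (some ov) nv xs = (List.range xs.length).foldl (fun acc i =>
      if acc.getD i "" = f ∧ i + 1 < acc.length ∧ acc.getD (i+1) "" = ov then
        acc.set (i+1) nv else acc) xs := rfl
  rw [he, pvPairFold_getElem? f ov nv hf ho hfo hfn xs xs.length j]
  split_ifs with h1 h2 h2
  · rfl
  · exact absurd ⟨h1.1, h1.2.2.1, h1.2.2.2⟩ h2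
  · obtain ⟨a, c, d⟩ := h2
    obtain ⟨hlt, -⟩ := List.getElem?_eq_some_iff.mp d
    exact absurd ⟨a, by omega, c, d⟩ h1
  · rfl

theorem pvSingleFold_length (f nv : String) (l : List Nat) (acc : List String) :
    (l.foldl (fun acc i =>
      if acc.getD i "" = f then acc.set i nv else acc) acc).length = acc.length := by
  induction l generalizing acc with
  | nil => rfl
  | cons i t ih => rw [List.foldl_cons, ih]; split_ifs <;> simp

theorem pvSingleFold_getElem? (f nv : String) (hf : f ≠ "") (xs : List String) (n j : Nat) :
    ((List.range n).foldl (fun acc i =>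
      if acc.getD i "" = f then acc.set i nv else acc) xs)[j]? =
    if j < n ∧ xs[j]? = some f then some nv else xs[j]? := by
  induction n generalizing j with
  | zero =>
    rw [List.range_zero, List.foldl_nil, if_neg (by rintro ⟨a, -⟩; omega)]
  | succ n ih =>
    rw [List.range_succ, List.foldl_append, List.foldl_cons, List.foldl_nil]
    set acc : List String := (List.range n).foldl (fun acc i =>
      if acc.getD i "" = f then acc.set i nv else acc) xs with hacc
    have hlen : acc.length = xs.length := pvSingleFold_length f nv _ xs
    have hn : acc[n]? = xs[n]? := by rw [ih n]; rw [if_neg (by rintro ⟨a, -⟩; omega)]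
    have hgd : acc.getD n "" = (acc[n]?).getD "" := List.getD_eq_getElem?_getD
    by_cases hc : xs[n]? = some f
    · obtain ⟨hlt, -⟩ := List.getElem?_eq_some_iff.mp hc
      rw [if_pos (by rw [hgd, hn, hc]; rfl), List.getElem?_set]
      by_cases hj : n = j
      · subst hj
        rw [if_pos rfl, if_pos (by omega), if_pos ⟨by omega, hc⟩]
      · rw [if_neg hj, ih j]
        split_ifs with h1 h2 h2
        · rfl
        · exact absurd ⟨by omega, h1.2⟩ h2
        · exact absurd ⟨by omega, h2.2⟩ h1
        · rfl
    · have hne : ¬ acc.getD n "" = f := by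
        rw [hgd, hn]
        cases h4 : xs[n]? with
        | none => simpa using fun h => hf h
        | some v =>
          simp only [Option.getD_some]
          exact fun h => hc (by rw [h4, h])
      rw [if_neg hne, ih j]
      split_ifs with h1 h2 h2
      · rfl
      · exact absurd ⟨by omega, h1.2⟩ h2
      · rcases h2 with ⟨a, b⟩
        have : ¬ j = n := fun h => hc (h ▸ b)
        exact absurd ⟨by omega, b⟩ h1
      · rfl

-- pointwise value of one single-flag scan
theorem pvAScan_single_getElem? (f nv : String) (hf : f ≠ "") (xs : List String) (j : Nat) :
    (pvAScan f none nv xs)[j]? =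
    if xs[j]? = some f then some nv else xs[j]? := by
  have he : pvAScan f none nv xs = (List.range xs.length).foldl (fun acc i =>
      if acc.getD i "" = f then acc.set i nv else acc) xs := rfl
  rw [he, pvSingleFold_getElem? f nv hf xs xs.length j]
  split_ifs with h1 h2 h2
  · rfl
  · exact absurd h1.2 h2
  · obtain ⟨hlt, -⟩ := List.getElem?_eq_some_iff.mp h2
    exact absurd ⟨hlt, h2⟩ h1
  · rfl

-- pointwise value of B's single pass
theorem pvAltLoop_getElem? (s : PySem.Dict String String) (p : PySem.Dict String (String × String))
    (prev : Option String) (xs : List String) (j : Nat) :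
    (pvAltLoop s p prev xs)[j]? =
    (xs[j]?).map (pvOutTok s p (if j = 0 then prev else xs[j-1]?)) := by
  induction xs generalizing prev j with
  | nil => simp [pvAltLoop]
  | cons tok rest ih =>
    cases j with
    | zero => simp [pvAltLoop]
    | succ j =>
      rw [pvAltLoop]
      simp only [List.getElem?_cons_succ, ih (some tok) j]
      cases j with
      | zero => simp
      | succ k => simp

-- one pair rule: A's scan = B's pass
theorem pvOnePair (f ov nv : String) (hf : f ≠ "") (ho : ov ≠ "")
    (hfo : f ≠ ov) (hfn : f ≠ nv) (xs : List String) :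
    pvAScan f (some ov) nv xs =
    pvAltLoop PySem.Dict.empty (PySem.Dict.empty.insert f (ov, nv)) none xs := by
  apply List.ext_getElem?
  intro j
  rw [pvAScan_pair_getElem? f ov nv hf ho hfo hfn xs j, pvAltLoop_getElem?]
  cases j with
  | zero =>
    rw [if_neg (by rintro ⟨h, -⟩; omega)]
    cases hx : xs[0]? with
    | none => rfl
    | some tok => simp [pvOutTok, PySem.Dict.get?_empty]
  | succ k =>
    simp only [Nat.add_sub_cancel]
    rw [if_neg (Nat.succ_ne_zero k)]
    cases hp : xs[k]? with
    | none =>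
      rw [if_neg (by rintro ⟨-, h, -⟩; cases h)]
      cases hx : xs[k+1]? with
      | none => rfl
      | some tok => simp [pvOutTok, PySem.Dict.get?_empty]
    | some p =>
      cases hx : xs[k+1]? with
      | none => rw [if_neg (by rintro ⟨-, -, h⟩; cases h)]; rfl
      | some tok =>
        simp only [Option.map_some]
        by_cases hpf : p = f
        · subst hpf
          by_cases ht : tok = ov
          · subst ht
            rw [if_pos ⟨by omega, rfl, rfl⟩]
            simp [pvOutTok, PySem.Dict.get?_empty, PySem.Dict.get?_insert_self]
          · rw [if_neg (by rintro ⟨-, -, h⟩; exact ht (by simpa using h))]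
            simp [pvOutTok, PySem.Dict.get?_empty, PySem.Dict.get?_insert_self, ht]
        · rw [if_neg (by rintro ⟨-, h, -⟩; exact hpf (by simpa using h))]
          simp [pvOutTok, PySem.Dict.get?_empty, PySem.Dict.get?_insert, hpf]

-- one single-flag rule: A's scan = B's pass
theorem pvOneSingle (f nv : String) (hf : f ≠ "") (xs : List String) :
    pvAScan f none nv xs =
    pvAltLoop (PySem.Dict.empty.insert f nv) PySem.Dict.empty none xs := by
  apply List.ext_getElem?
  intro j
  rw [pvAScan_single_getElem? f nv hf xs j, pvAltLoop_getElem?]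
  cases hx : xs[j]? with
  | none => rw [if_neg (by intro h; cases h)]; rfl
  | some tok =>
    simp only [Option.map_some]
    by_cases ht : tok = f
    · subst ht
      rw [if_pos rfl]
      simp [pvOutTok, PySem.Dict.get?_insert_self]
    · rw [if_neg (by intro h; exact ht (by simpa using h))]
      simp [pvOutTok, PySem.Dict.get?_insert, PySem.Dict.get?_empty, ht]

-- two pair rules applied in sequence: A's two scans = B's one pass
theorem pvTwoPair (f1 ov1 nv1 f2 ov2 nv2 : String)
    (hf1 : f1 ≠ "") (ho1 : ov1 ≠ "") (h11 : f1 ≠ ov1) (h12 : f1 ≠ nv1)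
    (hf2 : f2 ≠ "") (ho2 : ov2 ≠ "") (h21 : f2 ≠ ov2) (h22 : f2 ≠ nv2)
    (hff : f1 ≠ f2) (hnf : nv1 ≠ f2) (hof : ov1 ≠ f2) (xs : List String) :
    pvAScan f2 (some ov2) nv2 (pvAScan f1 (some ov1) nv1 xs) =
    pvAltLoop PySem.Dict.empty
      ((PySem.Dict.empty.insert f1 (ov1, nv1)).insert f2 (ov2, nv2)) none xs := by
  apply List.ext_getElem?
  intro j
  rw [pvAScan_pair_getElem? f2 ov2 nv2 hf2 ho2 h21 h22 _ j, pvAltLoop_getElem?,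
    pvAScan_pair_getElem? f1 ov1 nv1 hf1 ho1 h11 h12 xs (j-1),
    pvAScan_pair_getElem? f1 ov1 nv1 hf1 ho1 h11 h12 xs j]
  cases j with
  | zero =>
    rw [if_neg (by rintro ⟨h, -⟩; omega), if_neg (by rintro ⟨h, -⟩; omega)]
    cases hx : xs[0]? with
    | none => rfl
    | some tok => simp [pvOutTok, PySem.Dict.get?_empty]
  | succ k =>
    simp only [Nat.add_sub_cancel]
    rw [if_neg (Nat.succ_ne_zero k)]
    by_cases hin : 1 ≤ k ∧ xs[k-1]? = some f1 ∧ xs[k]? = some ov1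
    · rw [if_pos hin]
      rw [if_neg (by rintro ⟨-, h, -⟩; exact hnf (by simpa using h))]
      rw [if_neg (by
        rintro ⟨-, h, -⟩
        rw [hin.2.2] at h
        exact h11 (Option.some_injective _ h).symm)]
      rw [hin.2.2]
      cases hx : xs[k+1]? with
      | none => rfl
      | some tok =>
        simp [pvOutTok, PySem.Dict.get?_empty, PySem.Dict.get?_insert, hof, Ne.symm h11]
    · rw [if_neg hin]
      cases hp : xs[k]? with
      | none =>
        rw [if_neg (by rintro ⟨-, h, -⟩; cases h)]
        rw [if_neg (by rintro ⟨-, h, -⟩; cases h)]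
        cases hx : xs[k+1]? with
        | none => rfl
        | some tok => simp [pvOutTok, PySem.Dict.get?_empty]
      | some p =>
        cases hx : xs[k+1]? with
        | none =>
          have hE : (if 1 ≤ k + 1 ∧ some p = some f1 ∧ (none : Option String) = some ov1
              then some nv1 else (none : Option String)) = none :=
            if_neg (by rintro ⟨-, -, h⟩; cases h)
          rw [hE, if_neg (by rintro ⟨-, -, h⟩; cases h)]
          rfl
        | some tok =>
          simp only [Option.map_some]
          by_cases hp1 : p = f1
          · by_cases ht : tok = ov1
            · have hE : (if 1 ≤ k + 1 ∧ some p = some f1 ∧ some tok = some ov1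
                  then some nv1 else some tok) = some nv1 :=
                if_pos ⟨by omega, by rw [hp1], by rw [ht]⟩
              rw [hE, if_neg (by
                rintro ⟨-, h, -⟩
                rw [hp1] at h
                exact hff (by simpa using h))]
              simp [pvOutTok, PySem.Dict.get?_empty, PySem.Dict.get?_insert, hp1, hff, ht]
            · have hE : (if 1 ≤ k + 1 ∧ some p = some f1 ∧ some tok = some ov1
                  then some nv1 else some tok) = some tok :=
                if_neg (by rintro ⟨-, -, h⟩; exact ht (by simpa using h))
              rw [hE, if_neg (by
                rintro ⟨-, h, -⟩
                rw [hp1] at h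
                exact hff (by simpa using h))]
              simp [pvOutTok, PySem.Dict.get?_empty, PySem.Dict.get?_insert, hp1, hff, ht]
          · have hE : (if 1 ≤ k + 1 ∧ some p = some f1 ∧ some tok = some ov1
                then some nv1 else some tok) = some tok :=
              if_neg (by rintro ⟨-, h, -⟩; exact hp1 (by simpa using h))
            rw [hE]
            by_cases hp2 : p = f2
            · by_cases ht : tok = ov2
              · rw [if_pos ⟨by omega, by rw [hp2], by rw [ht]⟩]
                simp [pvOutTok, PySem.Dict.get?_empty, PySem.Dict.get?_insert, hp2, ht]
              · rw [if_neg (by rintro ⟨-, -, h⟩; exact ht (by simpa using h))]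
                simp [pvOutTok, PySem.Dict.get?_empty, PySem.Dict.get?_insert, hp2, ht]
            · rw [if_neg (by rintro ⟨-, h, -⟩; exact hp2 (by simpa using h))]
              simp [pvOutTok, PySem.Dict.get?_empty, PySem.Dict.get?_insert, hp1, hp2]

-- ===== VERDICT (by name: the statement is the Claim_ definition above) =====
theorem apply_turbo_args_spec : Claim_equal_apply_turbo_args := by
  intro tool cmd enabled _
  unfold Spec_apply_turbo_args
  cases enabled with
  | false => rfl
  | true =>
    by_cases h1 : tool = "httpx"
    · subst h1
      exact pvOnePair "-rl" "15" "150" (by decide) (by decide) (by decide) (by decide) cmd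
    by_cases h2 : tool = "ffuf"
    · subst h2
      exact pvOnePair "-t" "10" "100" (by decide) (by decide) (by decide) (by decide) cmd
    by_cases h3 : tool = "arjun"
    · subst h3
      exact pvOnePair "-t" "5" "30" (by decide) (by decide) (by decide) (by decide) cmd
    by_cases h4 : tool = "sqlmap"
    · subst h4
      exact pvOneSingle "--threads=3" "--threads=10" (by decide) cmd
    by_cases h5 : tool = "nuclei"
    · subst h5
      exact pvTwoPair "-rl" "5" "150" "-c" "5" "50" (by decide) (by decide) (by decide)
        (by decide) (by decide) (by decide) (by decide) (by decide) (by decide) (by decide)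
        (by decide) cmd
    by_cases h6 : tool = "naabu"
    · subst h6
      exact pvTwoPair "-rate" "250" "1000" "-top-ports" "1000" "1000" (by decide) (by decide)
        (by decide) (by decide) (by decide) (by decide) (by decide) (by decide) (by decide)
        (by decide) (by decide) cmd
    · have hg : pvTurboMapA.get? tool = none := by
        have hm : pvTurboMapA = PySem.Dict.mk [("httpx", [["-rl", "15", "150"]]),
          ("ffuf", [["-t", "10", "100"]]), ("arjun", [["-t", "5", "30"]]),
          ("sqlmap", [["--threads=3", "--threads=10"]]),
          ("nuclei", [["-rl", "5", "150"], ["-c", "5", "50"]]),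
          ("naabu", [["-rate", "250", "1000"], ["-top-ports", "1000", "1000"]])] := rfl
        rw [hm]
        simp [beq_iff_eq, Ne.symm h1, Ne.symm h2, Ne.symm h3,
          Ne.symm h4, Ne.symm h5, Ne.symm h6, PySem.Dict.get?]
      have hgB : pvTurboMapB.get? tool = none := hg
      show apply_turbo_args tool cmd true = apply_turbo_args_alt tool cmd true
      simp only [apply_turbo_args, apply_turbo_args_alt, Bool.not_true, hg, hgB]
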